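-- pv_equiv track=rewrite | github.com/chutianwen/LeetCodes | LeetCodes/facebook/GetAllAnagram.py | get_all_anagram
-- ===== SOURCE A (Python) =====
-- def get_all_anagram(s: str):
--
-- 	from collections import Counter
-- 	letter_cnt = Counter(s)
-- 	num_to_go = len(s)
-- 	res = []
--
-- 	def driver(cur, num_to_go):
--
-- 		if num_to_go == 0:
-- 			res.append(cur)
--
-- 		for letter in letter_cnt:
-- 			if letter_cnt[letter] > 0:
-- 				letter_cnt[letter] -= 1
-- 				driver(cur + letter, num_to_go - 1)
-- 				letter_cnt[letter] += 1
--
-- 	driver("", num_to_go)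
-- 	return res
-- ===== SOURCE B (Python) =====
-- def get_all_anagram(s: str):
--     # Breadth-first level expansion instead of recursive backtracking:
--     # grow every partial anagram by one letter per round, len(s) rounds.
--     keys = list(dict.fromkeys(s))
--     level = [""]
--     for _ in range(len(s)):
--         level = [p + c for p in level
--                  for c in keys if p.count(c) < s.count(c)]
--     return level
-- ===== Notes on version B (the rewrite author's own statement) =====
-- stated objective: alternative
-- what changed: Replaces A's recursive backtracking with a mutable Counter by an iterative breadth-first level expansion: starting from [""], one list comprehension per letter position extends every partial anagram by each still-available distinct letter (availability read off p.count(c) < s.count(c)), which yields the same leaves in the same order without recursion or mutation.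
import Mathlib
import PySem

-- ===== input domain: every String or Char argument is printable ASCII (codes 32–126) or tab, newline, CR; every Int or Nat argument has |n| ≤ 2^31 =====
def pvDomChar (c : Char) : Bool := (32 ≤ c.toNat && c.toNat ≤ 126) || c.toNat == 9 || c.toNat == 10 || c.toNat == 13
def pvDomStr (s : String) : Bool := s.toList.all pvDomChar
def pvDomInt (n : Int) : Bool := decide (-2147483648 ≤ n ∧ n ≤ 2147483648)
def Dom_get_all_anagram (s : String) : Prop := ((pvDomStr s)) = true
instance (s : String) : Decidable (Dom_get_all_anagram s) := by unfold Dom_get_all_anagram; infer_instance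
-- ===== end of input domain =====

-- B replaces A's recursive backtracking over a mutable Counter by a breadth-first
-- level expansion (one comprehension per letter position); alternative decomposition, not faster.


-- ===== PORT A =====
-- driver(cur, num_to_go): Python decrements letter_cnt[letter] before the recursive call and
-- re-increments it after, so every call leaves letter_cnt unchanged; the port passes the
-- decremented dict to the recursive call and reuses the original dict afterwards — exact.
-- When num_to_go == 0 the Python appends cur and still runs the loop, but on every call
-- reachable from driver("", len(s)) num_to_go equals the total remaining count, so the loop
-- body never fires there; the port makes that branch a plain append (exact on reachable calls,
-- and it gives the Nat recursion its structural measure). cur is kept as List Char (exact: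
-- Python only appends single characters and finally stores the string).
def pvDriverA (cnt : PySem.Dict Char Int) (cur : List Char) : Nat → List String → List String
  | 0, res => res ++ [String.ofList cur]
  | n + 1, res =>
      cnt.keys.foldl (fun r letter =>
        if cnt.getD letter 0 > 0 then
          pvDriverA (cnt.modify letter 0 (· - 1)) (cur ++ [letter]) n r
        else r) res

def get_all_anagram (s : String) : List String :=
  pvDriverA (PySem.Dict.counter s.toList) [] s.toList.length []

-- ===== PORT B =====
-- one round of Source B's comprehension: extend every partial anagram p by each still-available
-- distinct letter c (p.count(c) on length-1 needles is exactly List.count)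
def pvExpand (cs : List Char) (keys : List Char) (level : List (List Char)) : List (List Char) :=
  level.flatMap (fun p => (keys.filter (fun c => p.count c < cs.count c)).map (fun c => p ++ [c]))

def get_all_anagram_alt (s : String) : List String :=
  -- keys = list(dict.fromkeys(s)) is PySem.List.dedup s.toList
  (((List.range s.toList.length).foldl
      (fun level _ => pvExpand s.toList (PySem.List.dedup s.toList) level) [[]])).map String.ofList

-- ===== PRECONDITION & SPEC =====
def Spec_get_all_anagram (s : String) (out : List String) : Prop := out = get_all_anagram_alt s
instance (s : String) (out : List String) : Decidable (Spec_get_all_anagram s out) := by unfold Spec_get_all_anagram; infer_instance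

-- ===== CLAIM (what is proved, stated in full; the proofs are below) =====
def Claim_equal_get_all_anagram : Prop := ∀ (s : String), Dom_get_all_anagram s → Spec_get_all_anagram s (get_all_anagram s)

-- ===== LEMMAS AND PROOFS =====

-- n-fold application of one expansion round
def pvIterE (cs keys : List Char) : Nat → List (List Char) → List (List Char)
  | 0, l => l
  | n + 1, l => pvExpand cs keys (pvIterE cs keys n l)

theorem pvExpand_append (cs keys : List Char) (l₁ l₂ : List (List Char)) :
    pvExpand cs keys (l₁ ++ l₂) = pvExpand cs keys l₁ ++ pvExpand cs keys l₂ := by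
  simp [pvExpand]

theorem pvExpand_nil (cs keys : List Char) : pvExpand cs keys [] = [] := rfl

theorem pvIterE_append (cs keys : List Char) (n : Nat) (l₁ l₂ : List (List Char)) :
    pvIterE cs keys n (l₁ ++ l₂) = pvIterE cs keys n l₁ ++ pvIterE cs keys n l₂ := by
  induction n with
  | zero => rfl
  | succ n ih => simp [pvIterE, ih, pvExpand_append]

theorem pvIterE_nil (cs keys : List Char) (n : Nat) : pvIterE cs keys n [] = [] := by
  induction n with
  | zero => rfl
  | succ n ih => simp [pvIterE, ih, pvExpand_nil]

theorem pvIterE_succ_inner (cs keys : List Char) (n : Nat) (l : List (List Char)) :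
    pvIterE cs keys (n + 1) l = pvIterE cs keys n (pvExpand cs keys l) := by
  induction n generalizing l with
  | zero => rfl
  | succ n ih =>
    show pvExpand cs keys (pvIterE cs keys (n + 1) l)
       = pvExpand cs keys (pvIterE cs keys n (pvExpand cs keys l))
    rw [ih]

theorem pvFilterMap_eq_flatMap (cur cs : List Char) (ks : List Char) :
    (ks.filter (fun c => cur.count c < cs.count c)).map (fun c => cur ++ [c])
      = ks.flatMap (fun k => if cur.count k < cs.count k then [cur ++ [k]] else []) := by
  induction ks with
  | nil => rfl
  | cons a t ih => by_cases h : cur.count a < cs.count a <;> simp [h, ih]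

theorem pvIterE_flatMap (cs keys : List Char) (n : Nat) (ks : List Char) (f : Char → List (List Char)) :
    pvIterE cs keys n (ks.flatMap f) = ks.flatMap (fun k => pvIterE cs keys n (f k)) := by
  induction ks with
  | nil => simp [pvIterE_nil]
  | cons k ks ih => simp [List.flatMap_cons, pvIterE_append, ih]

-- the B-side foldl over range(len s) is the n-fold iteration
theorem pvFoldRange_eq_iterE (cs keys : List Char) (n : Nat) (l : List (List Char)) :
    (List.range n).foldl (fun level _ => pvExpand cs keys level) l = pvIterE cs keys n l := by
  induction n with
  | zero => rfl
  | succ n ih => rw [List.range_succ, List.foldl_append, ih]; rfl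

-- the DFS of A, started at a state whose counter is "total minus letters already used",
-- produces exactly the n-th breadth-first level of B grown from cur
theorem pvDriverA_eq_iterE (cs keys : List Char) (n : Nat) :
    ∀ (cnt : PySem.Dict Char Int) (cur : List Char) (res : List String),
      cnt.keys = keys →
      (∀ k, cnt.getD k 0 = (cs.count k : Int) - (cur.count k : Int)) →
      pvDriverA cnt cur n res = res ++ (pvIterE cs keys n [cur]).map String.ofList := by
  induction n with
  | zero => intro cnt cur res _ _; simp [pvDriverA, pvIterE]
  | succ n ih =>
    intro cnt cur res hkeys hcnt
    have hstep : ∀ (ks : List Char) (r : List String), (∀ k ∈ ks, k ∈ cnt.keys) →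
        ks.foldl (fun r letter =>
          if cnt.getD letter 0 > 0 then
            pvDriverA (cnt.modify letter 0 (· - 1)) (cur ++ [letter]) n r
          else r) r
        = r ++ (ks.flatMap (fun k =>
            if cnt.getD k 0 > 0 then (pvIterE cs keys n [cur ++ [k]]).map String.ofList else [])) := by
      intro ks
      induction ks with
      | nil => intro r _; simp
      | cons k ks ihks =>
        intro r hmem
        have hk : k ∈ cnt.keys := hmem k (List.mem_cons_self ..)
        have hks : ∀ k' ∈ ks, k' ∈ cnt.keys := fun k' h => hmem k' (List.mem_cons_of_mem _ h)
        by_cases hpos : cnt.getD k 0 > 0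
        · have hcontains : cnt.contains k = true :=
            (PySem.Dict.contains_iff_mem_keys cnt k).2 hk
          have hkeys' : (cnt.modify k 0 (· - 1)).keys = keys := by
            rw [PySem.Dict.keys_modify, PySem.Dict.keys_insert_of_contains _ _ hcontains, hkeys]
          have hcnt' : ∀ k', (cnt.modify k 0 (· - 1)).getD k' 0
              = (cs.count k' : Int) - ((cur ++ [k]).count k' : Int) := by
            intro k'
            by_cases hk' : k' = k
            · subst hk'
              rw [PySem.Dict.getD_modify_self, hcnt k']
              simp [List.count_append]
              ring
            · have hne : k' ≠ k := hk'
              have hgd := PySem.Dict.getD_modify_of_ne (d := cnt) (d0 := (0 : Int))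
                (f := fun x => x - 1) hne
              rw [hgd, hcnt k']
              simp [List.count_append, Ne.symm hne]
          simp only [List.foldl_cons, List.flatMap_cons, if_pos hpos]
          rw [ihks _ hks, ih _ _ r hkeys' hcnt']
          simp
        · simp only [List.foldl_cons, List.flatMap_cons, if_neg hpos]
          rw [ihks _ hks]
          simp
    have hcond : ∀ k, (cnt.getD k 0 > 0) ↔ (cur.count k < cs.count k) := by
      intro k; rw [hcnt k]; omega
    calc pvDriverA cnt cur (n + 1) res
        = cnt.keys.foldl (fun r letter =>
            if cnt.getD letter 0 > 0 then
              pvDriverA (cnt.modify letter 0 (· - 1)) (cur ++ [letter]) n r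
            else r) res := rfl
      _ = res ++ (cnt.keys.flatMap (fun k =>
            if cnt.getD k 0 > 0 then (pvIterE cs keys n [cur ++ [k]]).map String.ofList else [])) :=
          hstep cnt.keys res (fun _ h => h)
      _ = res ++ (pvIterE cs keys (n + 1) [cur]).map String.ofList := by
          rw [pvIterE_succ_inner]
          have hE : pvExpand cs keys [cur]
              = keys.flatMap (fun k => if cur.count k < cs.count k then [cur ++ [k]] else []) := by
            show (keys.filter (fun c => cur.count c < cs.count c)).map (fun c => cur ++ [c]) ++ [] = _
            rw [List.append_nil, pvFilterMap_eq_flatMap]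
          rw [hE, pvIterE_flatMap, hkeys]
          congr 1
          rw [List.map_flatMap]
          congr 1
          funext k
          by_cases h : cur.count k < cs.count k
          · rw [if_pos h, if_pos ((hcond k).2 h)]
          · rw [if_neg h, if_neg (fun hp => h ((hcond k).1 hp))]
            simp [pvIterE_nil]

-- ===== VERDICT (by name: the statement is the Claim_ definition above) =====
theorem get_all_anagram_spec : Claim_equal_get_all_anagram := by
  intro s _
  unfold Spec_get_all_anagram get_all_anagram get_all_anagram_alt
  rw [pvFoldRange_eq_iterE, PySem.List.dedup_eq_ofList]
  rw [pvDriverA_eq_iterE s.toList (PySem.Set.ofList s.toList) s.toList.length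
        (PySem.Dict.counter s.toList) [] [] (PySem.Dict.keys_counter s.toList)
        (by intro k; rw [PySem.Dict.getD_counter]; simp)]
  simp
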